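-- pv_equiv track=rewrite | github.com/sungminstar/Algorithm | 프로그래머스/1/1845. 폰켓몬/폰켓몬.py | solution
-- ===== SOURCE A (Python) =====
-- def solution(nums):
--     # 해시 자료구조 활용 => 딕셔너리 활용
--     # 주어진 포켓몬 nums 정리 => "1(1번))" : 1, "2(2번)" : 1, "3(3번)" : 2
--         # 굳이 정리해야하나...? 그냥 중복 원소 제거하고 배열을 새로 만들어야 겠다!
--     # if len(nums) / 2 <= 딕셔너리의 키의 개수 :
--         # return len(nums) / 2
--     # else :
--         # return 딕셔너리의 키의 개수
--
--     kind_array = []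
--     for i in range(len(nums)) :
--         if nums[i] not in kind_array :
--             kind_array.append(nums[i])
--     if len(nums) // 2 <= len(kind_array) :
--         return len(nums) // 2
--     else :
--         return len(kind_array)
-- ===== SOURCE B (Python) =====
-- def solution(nums):
--     # Sort a copy and count distinct values by comparing adjacent elements,
--     # instead of a quadratic membership scan; then cap at len(nums)//2.
--     s = sorted(nums)
--     distinct = (1 if s else 0) + sum(1 for a, b in zip(s, s[1:]) if a != b)
--     half = len(nums) // 2
--     return half if half <= distinct else distinct
-- ===== Notes on version B (the rewrite author's own statement) =====
-- stated objective: faster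
-- what changed: Replaces the O(n^2) build-a-list-with-membership-tests distinct count by sorting a copy and counting adjacent changes in one linear pass.
import Mathlib
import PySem

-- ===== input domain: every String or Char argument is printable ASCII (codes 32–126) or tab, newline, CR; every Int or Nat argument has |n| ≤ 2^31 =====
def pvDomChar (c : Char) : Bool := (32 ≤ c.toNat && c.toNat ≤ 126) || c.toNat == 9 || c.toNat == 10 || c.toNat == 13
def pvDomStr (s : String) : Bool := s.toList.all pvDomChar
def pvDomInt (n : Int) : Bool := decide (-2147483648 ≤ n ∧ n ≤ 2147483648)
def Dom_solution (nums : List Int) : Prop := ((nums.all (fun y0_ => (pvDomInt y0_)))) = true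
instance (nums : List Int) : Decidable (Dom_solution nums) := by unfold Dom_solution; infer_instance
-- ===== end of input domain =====

-- B sorts a copy and counts distinct values by comparing adjacent elements (one linear pass)
-- instead of A's build-a-list-with-membership-tests; same return value, measured faster.

-- ===== PORT A =====
def solution (nums : List Int) : Int :=
  let kind_array :=
    (PySem.List.pyRange 0 (nums.length : Int) 1).foldl
      (fun acc i =>
        if PySem.List.pyGetD nums i 0 ∈ acc then acc
        else acc ++ [PySem.List.pyGetD nums i 0]) []
  if PySem.Int.floordiv (nums.length : Int) 2 ≤ (kind_array.length : Int) then
    PySem.Int.floordiv (nums.length : Int) 2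
  else
    (kind_array.length : Int)

-- ===== PORT B =====
def solution_alt (nums : List Int) : Int :=
  let s := PySem.List.sorted nums (fun x => x) false
  let distinct : Int :=
    (if s = [] then 0 else 1) +
      ((s.zip (PySem.List.slice s (some 1) none)).map
        (fun p => if p.1 ≠ p.2 then (1 : Int) else 0)).sum
  let half := PySem.Int.floordiv (nums.length : Int) 2
  if half ≤ distinct then half else distinct

-- ===== PRECONDITION & SPEC =====
def Spec_solution (nums : List Int) (out : Int) : Prop := out = solution_alt nums
instance (nums : List Int) (out : Int) : Decidable (Spec_solution nums out) := by unfold Spec_solution; infer_instance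

-- ===== CLAIM (what is proved, stated in full; the proofs are below) =====
def Claim_equal_solution : Prop := ∀ (nums : List Int), Dom_solution nums → Spec_solution nums (solution nums)

-- ===== LEMMAS AND PROOFS =====

-- membership in A's accumulator
lemma kindA_mem (l acc : List Int) (z : Int) :
    z ∈ l.foldl (fun acc x => if x ∈ acc then acc else acc ++ [x]) acc ↔ z ∈ acc ∨ z ∈ l := by
  induction l generalizing acc with
  | nil => simp
  | cons x t ih =>
    simp only [List.foldl_cons]
    by_cases hx : x ∈ acc
    · rw [if_pos hx, ih]
      constructor
      · rintro (h | h)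
        · exact Or.inl h
        · exact Or.inr (List.mem_cons_of_mem _ h)
      · rintro (h | h)
        · exact Or.inl h
        · rcases List.mem_cons.mp h with rfl | h
          · exact Or.inl hx
          · exact Or.inr h
    · rw [if_neg hx, ih]
      simp only [List.mem_append,  List.mem_cons]
      tauto

lemma kindA_nodup (l acc : List Int) (h : acc.Nodup) :
    (l.foldl (fun acc x => if x ∈ acc then acc else acc ++ [x]) acc).Nodup := by
  induction l generalizing acc with
  | nil => simpa using h
  | cons x t ih =>
    simp only [List.foldl_cons]
    by_cases hx : x ∈ acc
    · rw [if_pos hx]; exact ih acc h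
    · rw [if_neg hx]
      exact ih _ (by simp [List.nodup_append, h]; exact fun a ha hax => hx (hax ▸ ha))

lemma kindA_card (nums : List Int) :
    (nums.foldl (fun acc x => if x ∈ acc then acc else acc ++ [x]) []).length
      = nums.toFinset.card := by
  set r := nums.foldl (fun acc x => if x ∈ acc then acc else acc ++ [x]) [] with hr
  have hn : r.Nodup := kindA_nodup nums [] List.nodup_nil
  have htf : r.toFinset = nums.toFinset := by
    ext z
    simp only [List.mem_toFinset, hr, kindA_mem]
    simp
  rw [← List.toFinset_card_of_nodup hn, htf]

-- B's adjacent-change count on a sorted list is the number of distinct values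
lemma cntB (s : List Int) (h : s.Pairwise (· ≤ ·)) :
    ((if s = [] then 0 else 1) +
      ((s.zip s.tail).map (fun p => if p.1 ≠ p.2 then (1 : Int) else 0)).sum)
      = (s.toFinset.card : Int) := by
  induction s with
  | nil => simp
  | cons x t ih =>
    cases t with
    | nil => simp
    | cons y u =>
      have hyt : (y :: u).Pairwise (· ≤ ·) := h.of_cons
      have ihv := ih hyt
      have hstep :
          ((x :: y :: u).zip (x :: y :: u).tail).map
              (fun p => if p.1 ≠ p.2 then (1 : Int) else 0)
            = (if x ≠ y then (1 : Int) else 0) ::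
              ((y :: u).zip (y :: u).tail).map (fun p => if p.1 ≠ p.2 then (1 : Int) else 0) := by
        simp [List.zip]
      by_cases hxy : x = y
      · subst hxy
        have : (x :: x :: u).toFinset = (x :: u).toFinset := by
          simp [List.toFinset_cons]
        rw [this, ← ihv, hstep]
        simp
      · have hx_le : ∀ z ∈ y :: u, x ≤ z := by
          intro z hz; exact (List.pairwise_cons.mp h).1 z hz
        have hxlt : x < y := lt_of_le_of_ne (hx_le y (by simp)) hxy
        have hxnot : x ∉ (y :: u).toFinset := by
          simp only [List.mem_toFinset]
          intro hmem
          rcases List.mem_cons.mp hmem with rfl | hmem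
          · exact hxy rfl
          · have hyz : y ≤ x := (List.pairwise_cons.mp hyt).1 x hmem
            omega
        have hcard : (x :: y :: u).toFinset.card = (y :: u).toFinset.card + 1 := by
          simp only [List.toFinset_cons (a := x)]
          rw [Finset.card_insert_of_notMem hxnot]
        rw [hstep]
        simp only [List.sum_cons, if_neg (by simp : ¬(x :: y :: u) = []),
          if_neg (by simp : ¬(y :: u) = []), if_pos hxy] at *
        rw [hcard]
        push_cast
        linarith [ihv]

-- ===== VERDICT (by name: the statement is the Claim_ definition above) =====
theorem solution_spec : Claim_equal_solution := by
  intro nums _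
  show solution nums = solution_alt nums
  unfold solution solution_alt
  rw [PySem.List.foldl_pyRange_zero_pyGetD' nums 0
    (fun acc x => if x ∈ acc then acc else acc ++ [x]) []]
  simp only [PySem.List.slice_from_one]
  have hs : (PySem.List.sorted nums (fun x => x) false).Pairwise (· ≤ ·) := by
    simpa using PySem.List.sorted_pairwise nums (fun x => x)
  have hperm := PySem.List.sorted_perm nums (fun x => x) false
  have hcnt := cntB _ hs
  have htf : (PySem.List.sorted nums (fun x => x) false).toFinset = nums.toFinset := by
    ext z; simp [List.mem_toFinset, hperm.mem_iff]
  rw [htf] at hcnt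
  simp only [hcnt, kindA_card nums]
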